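-- pv_equiv track=rewrite | github.com/cirosantilli/project-euler-solvers | solvers/269.py | _count_for_subset_and_length
-- ===== SOURCE A (Python) =====
-- from collections import defaultdict
-- from typing import Dict, List, Tuple
--
-- def _count_for_subset_and_length(ks: Tuple[int, ...], length: int) -> int:
--     """Count length-digit numbers (leading digit nonzero, last digit nonzero)
--     whose digit polynomial has roots at -k for every k in ks.
--
--     Digits are processed from least significant (position 0) to most significant
--     (position length-1).
--     """
--
--     m = len(ks)
--     if m == 0:
--         return 0
--
--     def digits_for_pos(i: int) -> range:
--         # last digit (i=0) must be nonzero to avoid the separate root-0 case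
--         # leading digit (i=length-1) must be nonzero as well
--         if length == 1:
--             return range(1, 10)
--         if i == 0 or i == length - 1:
--             return range(1, 10)
--         return range(10)
--
--     start_state = (0,) * m
--     dp: Dict[Tuple[int, ...], int] = {start_state: 1}
--
--     for i in range(length):
--         ndp: Dict[Tuple[int, ...], int] = defaultdict(int)
--         for state, ways in dp.items():
--             for d in digits_for_pos(i):
--                 new_state: List[int] = []
--                 ok = True
--                 for c, k in zip(state, ks):
--                     s = c + d
--                     if s % k != 0:
--                         ok = False
--                         break
--                     new_state.append(-(s // k))
--                 if ok:
--                     ndp[tuple(new_state)] += ways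
--         dp = ndp
--         if not dp:
--             return 0
--
--     return dp.get(start_state, 0)
-- ===== SOURCE B (Python) =====
-- def _count_for_subset_and_length(ks, length):
--     """Two passes instead of A's single forward dict-of-counts sweep: a forward
--     pass records the reachable carry-state set at each position, a backward pass
--     counts completions over those recorded levels."""
--     m = len(ks)
--     if m == 0:
--         return 0
--     start = (0,) * m
--
--     def step(state, d):
--         if all((c + d) % k == 0 for c, k in zip(state, ks)):
--             return tuple(-((c + d) // k) for c, k in zip(state, ks))
--         return None
--
--     def digits(i):
--         lo = 1 if (length == 1 or i == 0 or i == length - 1) else 0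
--         return range(lo, 10)
--
--     # pass 1: forward reachable carry-state sets, one per position
--     levels = []
--     cur = {start}
--     for i in range(length):
--         levels.append(cur)
--         nxt = set()
--         for state in cur:
--             for d in digits(i):
--                 ns = step(state, d)
--                 if ns is not None:
--                     nxt.add(ns)
--         if not nxt:
--             return 0
--         cur = nxt
--
--     # pass 2: backward counting over the recorded levels
--     # (f.get(None, 0) is 0: None is never a key)
--     f = {state: (1 if state == start else 0) for state in cur}
--     i = len(levels) - 1
--     for level in reversed(levels):
--         f = {state: sum(f.get(step(state, d), 0) for d in digits(i)) for state in level}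
--         i -= 1
--     return f[start]
-- ===== Notes on version B (the rewrite author's own statement) =====
-- stated objective: alternative
-- what changed: Replaces A's single forward sweep that pushes a dict of carry-state counts through the positions with two passes: a forward pass that only records the reachable carry-state SET at each position (keeping A's early return 0 when it empties), then a backward pass that computes completion counts over those recorded levels; the per-digit transition checks all divisibilities over the zip first and then builds the new state by comprehension instead of A's ok-flag/break loop. …
-- outside the precondition, e.g. on _count_for_subset_and_length((11, 0), 1): A returns 0, B returns 0; on _count_for_subset_and_length((0,), 1): A raises ZeroDivisionError, B raises ZeroDivisionError
import Mathlib
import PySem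

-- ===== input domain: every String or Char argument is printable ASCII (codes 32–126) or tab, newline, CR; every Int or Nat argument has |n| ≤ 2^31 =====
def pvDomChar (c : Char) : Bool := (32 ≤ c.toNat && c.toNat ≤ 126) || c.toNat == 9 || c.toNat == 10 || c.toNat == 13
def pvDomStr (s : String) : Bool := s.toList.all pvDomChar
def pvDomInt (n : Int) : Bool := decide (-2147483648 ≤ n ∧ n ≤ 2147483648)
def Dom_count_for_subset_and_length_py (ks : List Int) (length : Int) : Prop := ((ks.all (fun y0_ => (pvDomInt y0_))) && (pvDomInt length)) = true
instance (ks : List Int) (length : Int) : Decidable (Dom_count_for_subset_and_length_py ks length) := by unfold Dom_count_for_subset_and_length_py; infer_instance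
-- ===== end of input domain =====

-- B replaces A's single forward sweep of a dict of carry-state counts by two passes:
-- a forward pass recording the reachable carry-state SET at each position, then a
-- backward pass computing completion counts over those recorded levels.

-- ===== PORT A =====
-- A's inner `for c, k in zip(state, ks)` loop with the ok-flag/break: none = the break was taken.
def pvStepA (state ks : List Int) (d : Int) : Option (List Int) :=
  match state, ks with
  | c :: cs, k :: kt =>
      if PySem.Int.mod (c + d) k ≠ 0 then none
      else
        match pvStepA cs kt d with
        | some r => some ((-(PySem.Int.floordiv (c + d) k)) :: r)
        | none => none
  | _, _ => some []

-- A's digits_for_pos(i) (closure over length)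
def pvDigitsA (length i : Int) : List Int :=
  if length = 1 then PySem.List.pyRange 1 10
  else if i = 0 ∨ i = length - 1 then PySem.List.pyRange 1 10
  else PySem.List.pyRange 0 10

-- one pass of A's `for state, ways in dp.items(): for d in …: ndp[new] += ways` (defaultdict int)
def pvNdpA (ks : List Int) (length : Int) (i : Int) (dp : PySem.Dict (List Int) Int) :
    PySem.Dict (List Int) Int :=
  dp.items.foldl (fun nd sw =>
    (pvDigitsA length i).foldl (fun nd d =>
      match pvStepA sw.1 ks d with
      | some ns => nd.modify ns 0 (· + sw.2)
      | none => nd) nd) PySem.Dict.empty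

-- A's `for i in range(length)` loop with the `if not dp: return 0` early exit
def pvLoopA (ks : List Int) (length : Int) (start : List Int) (i : Int)
    (dp : PySem.Dict (List Int) Int) : Int :=
  if _h : i < length then
    let ndp := pvNdpA ks length i dp
    if ndp.items = [] then 0
    else pvLoopA ks length start (i + 1) ndp
  else dp.getD start 0
termination_by (length - i).toNat
decreasing_by omega

def count_for_subset_and_length_py (ks : List Int) (length : Int) : Int :=
  let m := ks.length
  if m = 0 then 0
  else
    let start : List Int := List.replicate m 0
    pvLoopA ks length start 0 (PySem.Dict.empty.insert start 1)

-- ===== PORT B =====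
-- Source B's step(state, d): check every divisibility over the zip, then build the new state
def pvStepB (ks state : List Int) (d : Int) : Option (List Int) :=
  if (state.zip ks).all (fun p => PySem.Int.mod (p.1 + d) p.2 == 0)
  then some ((state.zip ks).map (fun p => -(PySem.Int.floordiv (p.1 + d) p.2)))
  else none

-- Source B's digits(i): lo = 1 on the boundary positions, else 0
def pvDigitsB (length i : Int) : List Int :=
  PySem.List.pyRange (if length = 1 ∨ i = 0 ∨ i = length - 1 then 1 else 0) 10

-- Source B's dict comprehension {s: g(s) for s in l}
def pvMkDict (l : List (List Int)) (g : List Int → Int) : PySem.Dict (List Int) Int :=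
  l.foldl (fun f s => f.insert s (g s)) PySem.Dict.empty

-- Source B's inner forward step: nxt = set(); for state in cur: for d in digits(i): add step(state,d)
def pvNxtB (ks : List Int) (length i : Int) (cur : PySem.Set (List Int)) :
    PySem.Set (List Int) :=
  cur.foldl (fun nxt state =>
    (pvDigitsB length i).foldl (fun nxt d =>
      match pvStepB ks state d with
      | some ns => PySem.Set.add nxt ns
      | none => nxt) nxt) PySem.Set.empty

-- Source B's pass 1: for i in range(length): levels.append(cur); …; if not nxt: return 0; cur = nxt
-- (none = the early `return 0`)
def pvFwdB (ks : List Int) (length : Int) (i : Int) (cur : PySem.Set (List Int))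
    (levels : List (PySem.Set (List Int))) :
    Option (List (PySem.Set (List Int)) × PySem.Set (List Int)) :=
  -- `levels.append(cur)` is ported with a cons accumulator, reversed on exit (O(1) per step)
  if _h : i < length then
    let nxt := pvNxtB ks length i cur
    if nxt = [] then none
    else pvFwdB ks length (i + 1) nxt (cur :: levels)
  else some (levels.reverse, cur)
termination_by (length - i).toNat
decreasing_by omega

-- Source B's pass-2 body: f = {s: sum(f.get(step(s,d), 0) for d in digits(i)) for s in level}
-- (Python's f.get(None, 0) is 0 — None is never a key of f — hence the `none => 0` arm)
def pvBStep (ks : List Int) (length i : Int) (f : PySem.Dict (List Int) Int)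
    (level : PySem.Set (List Int)) : PySem.Dict (List Int) Int :=
  pvMkDict level (fun state =>
    ((pvDigitsB length i).map (fun d =>
      match pvStepB ks state d with
      | some ns => f.getD ns 0
      | none => 0)).sum)

def count_for_subset_and_length_py_alt (ks : List Int) (length : Int) : Int :=
  if ks.length = 0 then 0
  else
    let start : List Int := List.replicate ks.length 0
    match pvFwdB ks length 0 (PySem.Set.ofList [start]) [] with
    | none => 0
    | some fl =>
    let f0 := pvMkDict fl.2 (fun state => if state = start then 1 else 0)
    -- `i = len(levels) - 1; for level in reversed(levels): f = …; i -= 1` as a foldl over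
    -- the reversed list carrying the (i, f) pair
    let r := (fl.1.reverse).foldl
      (fun (p : Int × PySem.Dict (List Int) Int) level =>
        (p.1 - 1, pvBStep ks length p.1 p.2 level))
      ((fl.1.length : Int) - 1, f0)
    -- Source B's final f[start]: start is always a key of f (level 0 = {start}), so getD is exact
    r.2.getD start 0

-- ===== PRECONDITION & SPEC =====
-- Pre_ excludes inputs with 0 ∈ ks and length ≥ 1: there both programs can reach 's % 0'
-- and raise ZeroDivisionError (whether they raise depends on which k is reached first).
-- For length ≤ 0 no division happens, so those inputs stay inside.
def Pre_count_for_subset_and_length_py (ks : List Int) (length : Int) : Prop :=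
  (0 : Int) ∉ ks ∨ length ≤ 0
instance (ks : List Int) (length : Int) : Decidable (Pre_count_for_subset_and_length_py ks length) := by
  unfold Pre_count_for_subset_and_length_py; infer_instance

def pvWitness_count_for_subset_and_length_py : List Int × Int := ([1, 2], 3)

def Spec_count_for_subset_and_length_py (ks : List Int) (length : Int) (out : Int) : Prop := out = count_for_subset_and_length_py_alt ks length
instance (ks : List Int) (length : Int) (out : Int) : Decidable (Spec_count_for_subset_and_length_py ks length out) := by unfold Spec_count_for_subset_and_length_py; infer_instance

-- ===== CLAIM (what is proved, stated in full; the proofs are below) =====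
def Claim_equal_count_for_subset_and_length_py : Prop := ∀ (ks : List Int) (length : Int), Dom_count_for_subset_and_length_py ks length → Pre_count_for_subset_and_length_py ks length → Spec_count_for_subset_and_length_py ks length (count_for_subset_and_length_py ks length)

-- ===== LEMMAS AND PROOFS =====

theorem pvWitness_ok :
    Dom_count_for_subset_and_length_py pvWitness_count_for_subset_and_length_py.1 pvWitness_count_for_subset_and_length_py.2 ∧
    Pre_count_for_subset_and_length_py pvWitness_count_for_subset_and_length_py.1 pvWitness_count_for_subset_and_length_py.2 := by
  decide

-- the common mathematical content: number of ways to fill positions i..length-1 from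
-- `state` ending at `start` (proof-level only; A's transition/digit helpers)
def pvF (ks : List Int) (length : Int) (start : List Int) (i : Int) (state : List Int) : Int :=
  if _h : length ≤ i then (if state = start then 1 else 0)
  else
    ((pvDigitsA length i).map (fun d =>
      match pvStepA state ks d with
      | some ns => pvF ks length start (i + 1) ns
      | none => 0)).sum
termination_by (length - i).toNat
decreasing_by omega

-- B's all-then-map transition computes A's break loop
theorem step_eq (state ks : List Int) (d : Int) : pvStepB ks state d = pvStepA state ks d := by
  induction state generalizing ks with
  | nil => cases ks <;> simp [pvStepA, pvStepB]
  | cons c cs ih =>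
      cases ks with
      | nil => simp [pvStepA, pvStepB]
      | cons k kt =>
          simp only [pvStepA, pvStepB, List.zip_cons_cons, List.all_cons, List.map_cons]
          by_cases hm : PySem.Int.mod (c + d) k = 0
          · rw [← ih kt]
            simp only [pvStepB]
            by_cases ha : ((cs.zip kt).all (fun p => PySem.Int.mod (p.1 + d) p.2 == 0)) = true
            · simp [hm, ha]
            · simp [hm, ha]
          · simp [hm]

theorem digits_eq (length i : Int) : pvDigitsB length i = pvDigitsA length i := by
  unfold pvDigitsA pvDigitsB
  split_ifs with h1 h2 h3 <;> first | rfl | (exfalso; tauto)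

-- ===== B-side: forward pass characterisation =====

-- the sequence of level sets the forward pass produces
def pvChain (ks : List Int) (length : Int) : Int → PySem.Set (List Int) → Nat →
    List (PySem.Set (List Int))
  | _, _, 0 => []
  | i, cur, n + 1 => cur :: pvChain ks length (i + 1) (pvNxtB ks length i cur) n

-- the final `cur` the forward pass produces
def pvFinal (ks : List Int) (length : Int) : Int → PySem.Set (List Int) → Nat →
    PySem.Set (List Int)
  | _, cur, 0 => cur
  | i, cur, n + 1 => pvFinal ks length (i + 1) (pvNxtB ks length i cur) n

-- whether the forward pass runs to the end without an empty level
def pvOk (ks : List Int) (length : Int) : Int → PySem.Set (List Int) → Nat → Prop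
  | _, _, 0 => True
  | i, cur, n + 1 => pvNxtB ks length i cur ≠ [] ∧ pvOk ks length (i + 1) (pvNxtB ks length i cur) n

theorem fwd_spec_ok (ks : List Int) (length : Int) :
    ∀ (n : Nat) (i : Int) (cur : PySem.Set (List Int)) (levels : List (PySem.Set (List Int))),
      (length - i).toNat = n → pvOk ks length i cur n →
      pvFwdB ks length i cur levels
        = some (levels.reverse ++ pvChain ks length i cur n, pvFinal ks length i cur n) := by
  intro n
  induction n with
  | zero =>
      intro i cur levels h0 _
      rw [pvFwdB, dif_neg (by omega : ¬ i < length)]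
      simp [pvChain, pvFinal]
  | succ n ih =>
      intro i cur levels h0 hok
      rw [pvFwdB, dif_pos (by omega : i < length)]
      simp only [if_neg hok.1]
      rw [ih (i + 1) (pvNxtB ks length i cur) (cur :: levels) (by omega) hok.2]
      simp [pvChain, pvFinal]

theorem fwd_spec_none (ks : List Int) (length : Int) :
    ∀ (n : Nat) (i : Int) (cur : PySem.Set (List Int)) (levels : List (PySem.Set (List Int))),
      (length - i).toNat = n → ¬ pvOk ks length i cur n →
      pvFwdB ks length i cur levels = none := by
  intro n
  induction n with
  | zero => intro i cur levels h0 hok; exact absurd trivial hok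
  | succ n ih =>
      intro i cur levels h0 hok
      rw [pvFwdB, dif_pos (by omega : i < length)]
      by_cases he : pvNxtB ks length i cur = []
      · simp [he]
      · simp only [if_neg he]
        exact ih (i + 1) (pvNxtB ks length i cur) (cur :: levels) (by omega)
          (fun h => hok ⟨he, h⟩)

-- membership in the inner digit fold-- membership in the inner digit fold of pvNxtB
theorem mem_inner_mono (ks : List Int) (state : List Int) (ds : List Int)
    (acc : PySem.Set (List Int)) (y : List Int) (hy : y ∈ acc) :
    y ∈ ds.foldl (fun nxt d =>
      match pvStepB ks state d with
      | some ns => PySem.Set.add nxt ns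
      | none => nxt) acc := by
  induction ds generalizing acc with
  | nil => exact hy
  | cons d dt ih =>
      simp only [List.foldl_cons]
      cases hs : pvStepB ks state d with
      | none => exact ih acc hy
      | some ns => exact ih _ ((PySem.Set.mem_add acc ns y).mpr (Or.inl hy))

theorem mem_inner (ks : List Int) (state : List Int) (ds : List Int)
    (acc : PySem.Set (List Int)) (d : Int) (ns : List Int)
    (hd : d ∈ ds) (hs : pvStepB ks state d = some ns) :
    ns ∈ ds.foldl (fun nxt d =>
      match pvStepB ks state d with
      | some ns => PySem.Set.add nxt ns
      | none => nxt) acc := by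
  induction ds generalizing acc with
  | nil => cases hd
  | cons d' dt ih =>
      simp only [List.foldl_cons]
      rcases List.mem_cons.mp hd with h | h
      · subst h
        rw [hs]
        exact mem_inner_mono ks state dt _ ns ((PySem.Set.mem_add acc ns ns).mpr (Or.inr rfl))
      · cases hs' : pvStepB ks state d' <;> exact ih _ h

theorem mem_outer_mono (ks : List Int) (length i : Int) (l : List (List Int))
    (acc : PySem.Set (List Int)) (y : List Int) (hy : y ∈ acc) :
    y ∈ l.foldl (fun nxt state =>
      (pvDigitsB length i).foldl (fun nxt d =>
        match pvStepB ks state d with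
        | some ns => PySem.Set.add nxt ns
        | none => nxt) nxt) acc := by
  induction l generalizing acc with
  | nil => exact hy
  | cons s t ih =>
      simp only [List.foldl_cons]
      exact ih _ (mem_inner_mono ks s (pvDigitsB length i) acc y hy)

theorem mem_outer (ks : List Int) (length i : Int) (state : List Int) (d : Int)
    (ns : List Int) (hd : d ∈ pvDigitsB length i) (hs : pvStepB ks state d = some ns) :
    ∀ (l : List (List Int)) (acc : PySem.Set (List Int)), state ∈ l →
    ns ∈ l.foldl (fun nxt state =>
      (pvDigitsB length i).foldl (fun nxt d =>
        match pvStepB ks state d with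
        | some ns => PySem.Set.add nxt ns
        | none => nxt) nxt) acc := by
  intro l
  induction l with
  | nil => intro acc h; cases h
  | cons s t ih =>
      intro acc hst
      simp only [List.foldl_cons]
      rcases List.mem_cons.mp hst with h | h
      · subst h
        exact mem_outer_mono ks length i t _ ns
          (mem_inner ks state (pvDigitsB length i) _ d ns hd hs)
      · exact ih _ h

theorem mem_nxt (ks : List Int) (length i : Int) (cur : PySem.Set (List Int))
    (state : List Int) (d : Int) (ns : List Int)
    (hst : state ∈ cur) (hd : d ∈ pvDigitsB length i) (hs : pvStepB ks state d = some ns) :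
    ns ∈ pvNxtB ks length i cur :=
  mem_outer ks length i state d ns hd hs cur PySem.Set.empty hst

-- the fold of pvNxtB keeps the no-duplicates invariant
theorem nodup_inner (ks : List Int) (state : List Int) (ds : List Int)
    (acc : PySem.Set (List Int)) (hn : acc.Nodup) :
    (ds.foldl (fun nxt d =>
      match pvStepB ks state d with
      | some ns => PySem.Set.add nxt ns
      | none => nxt) acc).Nodup := by
  induction ds generalizing acc with
  | nil => exact hn
  | cons d dt ih =>
      simp only [List.foldl_cons]
      cases hs : pvStepB ks state d with
      | none => exact ih acc hn
      | some ns => exact ih _ (PySem.Set.nodup_add acc ns hn)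

theorem nodup_nxt (ks : List Int) (length i : Int) (cur : PySem.Set (List Int)) :
    (pvNxtB ks length i cur).Nodup := by
  unfold pvNxtB
  have : ∀ (l : List (List Int)) (acc : PySem.Set (List Int)), acc.Nodup →
      (l.foldl (fun nxt state =>
        (pvDigitsB length i).foldl (fun nxt d =>
          match pvStepB ks state d with
          | some ns => PySem.Set.add nxt ns
          | none => nxt) nxt) acc).Nodup := by
    intro l
    induction l with
    | nil => exact fun acc h => h
    | cons s t ih =>
        intro acc h
        simp only [List.foldl_cons]
        exact ih _ (nodup_inner ks s (pvDigitsB length i) acc h)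
  exact this cur PySem.Set.empty List.nodup_nil

-- ===== B-side: the dict comprehension =====

theorem mkDict_items (l : List (List Int)) (g : List Int → Int) (hnd : l.Nodup) :
    (pvMkDict l g).items = l.map (fun s => (s, g s)) := by
  unfold pvMkDict
  have := PySem.Dict.items_foldl_insert_fresh l (fun s => s) g PySem.Dict.empty
    (fun a _ => PySem.Dict.contains_empty a) (by simpa using hnd)
  simpa using this

theorem mkDict_keys_nodup (l : List (List Int)) (g : List Int → Int) :
    (pvMkDict l g).keys.Nodup := by
  unfold pvMkDict
  exact PySem.Dict.nodup_keys_foldl_insert_key l (fun s => s) (fun f s => g s)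
    PySem.Dict.empty PySem.Dict.nodup_keys_empty

theorem mkDict_getD (l : List (List Int)) (g : List Int → Int) (hnd : l.Nodup)
    (s : List Int) (hs : s ∈ l) : (pvMkDict l g).getD s 0 = g s := by
  apply PySem.Dict.getD_of_mem_items
  · rw [mkDict_items l g hnd]
    exact List.mem_map.mpr ⟨s, hs, rfl⟩
  · exact mkDict_keys_nodup l g

theorem mkDict_congr (l : List (List Int)) (g₁ g₂ : List Int → Int)
    (h : ∀ s ∈ l, g₁ s = g₂ s) : pvMkDict l g₁ = pvMkDict l g₂ := by
  unfold pvMkDict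
  exact PySem.List.foldl_congr_mem l _ _ _ (fun acc s hs => by rw [h s hs])

-- ===== B-side: backward pass computes pvF on each recorded level =====

theorem chain_length (ks : List Int) (length : Int) :
    ∀ (n : Nat) (i : Int) (cur : PySem.Set (List Int)),
    (pvChain ks length i cur n).length = n := by
  intro n
  induction n with
  | zero => intro i cur; rfl
  | succ n ih => intro i cur; simp [pvChain, ih]

theorem bwd_eq (ks : List Int) (length : Int) (start : List Int) :
    ∀ (n : Nat) (i : Int) (cur : PySem.Set (List Int)),
      (length - i).toNat = n → cur.Nodup →
      ((pvChain ks length i cur n).reverse).foldl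
          (fun (p : Int × PySem.Dict (List Int) Int) level =>
            (p.1 - 1, pvBStep ks length p.1 p.2 level))
          (i + n - 1, pvMkDict (pvFinal ks length i cur n) (fun s => if s = start then 1 else 0))
        = (i - 1, pvMkDict cur (fun s => pvF ks length start i s)) := by
  intro n
  induction n with
  | zero =>
      intro i cur h0 hnd
      simp only [pvChain, pvFinal, List.reverse_nil, List.foldl_nil]
      refine Prod.ext (by omega) ?_
      apply mkDict_congr
      intro s _
      rw [pvF, dif_pos (by omega : length ≤ i)]
  | succ n ih =>
      intro i cur h0 hnd
      have hlt : i < length := by omega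
      simp only [pvChain, pvFinal]
      rw [List.foldl_reverse, List.foldr_cons, ← List.foldl_reverse]
      have harg : (i : Int) + (n + 1 : Nat) - 1 = (i + 1) + (n : Nat) - 1 := by push_cast; ring
      rw [harg, ih (i + 1) (pvNxtB ks length i cur) (by omega) (nodup_nxt ks length i cur)]
      refine Prod.ext (by simp) ?_
      simp only
      rw [show i + 1 - 1 = i by ring]
      unfold pvBStep
      apply mkDict_congr
      intro s hs
      rw [pvF, dif_neg (by omega : ¬ length ≤ i), ← digits_eq]
      congr 1
      apply List.map_congr_left
      intro d hd
      rw [step_eq]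
      cases hstep : pvStepA s ks d with
      | none => rfl
      | some ns =>
          simp only
          exact mkDict_getD _ _ (nodup_nxt ks length i cur) ns
            (mem_nxt ks length i cur s d ns hs hd (by rw [step_eq]; exact hstep))

-- if the forward pass dies out, every reachable state has no completions
theorem pvF_zero_of_not_ok (ks : List Int) (length : Int) (start : List Int) :
    ∀ (n : Nat) (i : Int) (cur : PySem.Set (List Int)),
      (length - i).toNat = n → ¬ pvOk ks length i cur n →
      ∀ s ∈ cur, pvF ks length start i s = 0 := by
  intro n
  induction n with
  | zero => intro i cur h0 hok; exact absurd trivial hok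
  | succ n ih =>
      intro i cur h0 hok s hs
      have hlt : i < length := by omega
      rw [pvF, dif_neg (by omega : ¬ length ≤ i)]
      have hz : ∀ d ∈ pvDigitsA length i,
          (match pvStepA s ks d with
           | some ns => pvF ks length start (i + 1) ns
           | none => (0 : Int)) = 0 := by
        intro d hd
        cases hstep : pvStepA s ks d with
        | none => rfl
        | some ns =>
            have hmem : ns ∈ pvNxtB ks length i cur :=
              mem_nxt ks length i cur s d ns hs (by rw [digits_eq]; exact hd)
                (by rw [step_eq]; exact hstep)
            by_cases he : pvNxtB ks length i cur = []
            · rw [he] at hmem; cases hmem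
            · exact ih (i + 1) (pvNxtB ks length i cur) (by omega)
                (fun h => hok ⟨he, h⟩) ns hmem
      rw [List.map_congr_left hz]
      simp

-- B equals pvF at the start state
theorem alt_eq_pvF (ks : List Int) (length : Int) (hm : ks.length ≠ 0) :
    count_for_subset_and_length_py_alt ks length
      = pvF ks length (List.replicate ks.length 0) 0 (List.replicate ks.length 0) := by
  by_cases hok : pvOk ks length 0 (PySem.Set.ofList [List.replicate ks.length 0])
      (length - 0).toNat
  · have h1 := fwd_spec_ok ks length (length - 0).toNat 0
      (PySem.Set.ofList [List.replicate ks.length 0]) [] rfl hok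
    have h2 := bwd_eq ks length (List.replicate ks.length 0) (length - 0).toNat 0
      (PySem.Set.ofList [List.replicate ks.length 0]) rfl
      (PySem.Set.nodup_ofList [List.replicate ks.length 0])
    have h3 := chain_length ks length (length - 0).toNat 0
      (PySem.Set.ofList [List.replicate ks.length 0])
    simp only [count_for_subset_and_length_py_alt, if_neg hm, h1, List.reverse_nil,
      List.nil_append, h3]
    rw [show ((length - 0).toNat : Int) - 1 = 0 + ((length - 0).toNat : Int) - 1 by ring, h2]
    exact mkDict_getD _ _ (PySem.Set.nodup_ofList [List.replicate ks.length 0]) _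
      ((PySem.Set.mem_ofList _ _).mpr (List.mem_singleton.mpr rfl))
  · have h1 := fwd_spec_none ks length (length - 0).toNat 0
      (PySem.Set.ofList [List.replicate ks.length 0]) [] rfl hok
    have h2 := pvF_zero_of_not_ok ks length (List.replicate ks.length 0) (length - 0).toNat 0
      (PySem.Set.ofList [List.replicate ks.length 0]) rfl hok (List.replicate ks.length 0)
      ((PySem.Set.mem_ofList _ _).mpr (List.mem_singleton.mpr rfl))
    simp only [count_for_subset_and_length_py_alt, if_neg hm, h1, h2]

-- ===== A-side: the dict sweep computes the weighted sum of pvF =====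

-- weighted sum of g over the entries of an association list
def Wsum (g : List Int → Int) (l : List (List Int × Int)) : Int :=
  (l.map (fun sw => sw.2 * g sw.1)).sum

theorem Wsum_append (g : List Int → Int) (l₁ l₂ : List (List Int × Int)) :
    Wsum g (l₁ ++ l₂) = Wsum g l₁ + Wsum g l₂ := by
  simp [Wsum]

-- an in-place update of the (unique) entry at key k adds v * g k to the weighted sum
theorem Wsum_map_update (g : List Int → Int) (k : List Int) (w v : Int) :
    ∀ (l : List (List Int × Int)), (l.map (fun p => p.1)).Nodup → (k, w) ∈ l →
    Wsum g (l.map (fun p => if p.1 == k then (k, w + v) else p)) = Wsum g l + v * g k := by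
  intro l
  induction l with
  | nil => simp
  | cons p t ih =>
      intro hn hm
      simp only [List.map_cons, List.nodup_cons, List.mem_map] at hn
      rcases List.mem_cons.mp hm with h1 | h1
      · have hp1 : p.1 = k := by rw [← h1]
        have ht : t.map (fun q => if q.1 == k then (k, w + v) else q) = t := by
          apply List.map_congr_left ?_ |>.trans (List.map_id t)
          intro x hx
          have hxk : x.1 ≠ k := by
            intro hxe
            exact hn.1 ⟨x, hx, hxe.trans hp1.symm⟩
          simp [hxk]
        have hw : p.2 = w := by rw [← h1]
        simp only [List.map_cons, hp1, beq_self_eq_true, if_true, ht]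
        simp only [Wsum, List.map_cons, List.sum_cons, hw, hp1]
        ring
      · have hk : k ∈ t.map (fun q => q.1) := List.mem_map.mpr ⟨(k, w), h1, rfl⟩
        have hp1 : ¬ (p.1 == k) = true := by
          simp only [beq_iff_eq]
          intro he
          exact hn.1 ⟨(k, w), h1, by rw [he]⟩
        simp only [List.map_cons, if_neg hp1]
        simp only [Wsum, List.map_cons, List.sum_cons]
        have := ih hn.2 h1
        simp only [Wsum] at this
        rw [this]
        ring

theorem Wsum_modify (g : List Int → Int) (d : PySem.Dict (List Int) Int) (k : List Int)
    (v : Int) (hn : d.keys.Nodup) :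
    Wsum g (d.modify k 0 (· + v)).items = Wsum g d.items + v * g k := by
  rw [PySem.Dict.modify]
  by_cases hc : d.contains k = true
  · obtain ⟨w, hw⟩ : ∃ w, d.get? k = some w := by
      rw [PySem.Dict.contains_eq_isSome_get?] at hc
      exact Option.isSome_iff_exists.mp hc
    have hD : d.getD k 0 = w := PySem.Dict.getD_of_get?_eq_some d 0 hw
    have hm : (k, w) ∈ d.items := PySem.Dict.mem_items_of_get?_eq_some d hw
    rw [PySem.Dict.items_insert_of_contains d _ hc, hD]
    exact Wsum_map_update g k w v d.items hn hm
  · have hc' : d.contains k = false := by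
      cases h : d.contains k
      · rfl
      · exact absurd h hc
    rw [PySem.Dict.items_insert_of_not_contains d _ hc',
        PySem.Dict.getD_of_not_contains d 0 hc', Wsum_append]
    simp [Wsum]

theorem nodup_modify (d : PySem.Dict (List Int) Int) (k : List Int) (v : Int)
    (hn : d.keys.Nodup) : (d.modify k 0 (· + v)).keys.Nodup := by
  rw [PySem.Dict.modify]
  exact PySem.Dict.nodup_keys_insert _ _ _ hn

-- folding A's inner digit loop over any digit list
theorem Wsum_fold_digits (g : List Int → Int) (ks : List Int) (state : List Int) (w : Int)
    (ds : List Int) (nd : PySem.Dict (List Int) Int) (hn : nd.keys.Nodup) :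
    Wsum g ((ds.foldl (fun nd d =>
        match pvStepA state ks d with
        | some ns => nd.modify ns 0 (· + w)
        | none => nd) nd).items)
      = Wsum g nd.items
        + w * (ds.map (fun d =>
            match pvStepA state ks d with
            | some ns => g ns
            | none => 0)).sum ∧
    (ds.foldl (fun nd d =>
        match pvStepA state ks d with
        | some ns => nd.modify ns 0 (· + w)
        | none => nd) nd).keys.Nodup := by
  induction ds generalizing nd with
  | nil => exact ⟨by simp, hn⟩
  | cons d ds ih =>
      simp only [List.foldl_cons, List.map_cons, List.sum_cons]
      cases hstep : pvStepA state ks d with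
      | none =>
          obtain ⟨hW, hN⟩ := ih nd hn
          exact ⟨by rw [hW]; ring, hN⟩
      | some ns =>
          obtain ⟨hW, hN⟩ := ih (nd.modify ns 0 (· + w)) (nodup_modify nd ns w hn)
          refine ⟨?_, hN⟩
          rw [hW, Wsum_modify g nd ns w hn]
          ring

-- folding A's outer items loop
theorem Wsum_fold_items (g : List Int → Int) (ks : List Int) (length i : Int)
    (l : List (List Int × Int)) (nd : PySem.Dict (List Int) Int) (hn : nd.keys.Nodup) :
    Wsum g ((l.foldl (fun nd sw =>
        (pvDigitsA length i).foldl (fun nd d =>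
          match pvStepA sw.1 ks d with
          | some ns => nd.modify ns 0 (· + sw.2)
          | none => nd) nd) nd).items)
      = Wsum g nd.items
        + Wsum (fun s => ((pvDigitsA length i).map (fun d =>
            match pvStepA s ks d with
            | some ns => g ns
            | none => 0)).sum) l ∧
    (l.foldl (fun nd sw =>
        (pvDigitsA length i).foldl (fun nd d =>
          match pvStepA sw.1 ks d with
          | some ns => nd.modify ns 0 (· + sw.2)
          | none => nd) nd) nd).keys.Nodup := by
  induction l generalizing nd with
  | nil => exact ⟨by simp [Wsum], hn⟩
  | cons sw t ih =>
      simp only [List.foldl_cons]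
      obtain ⟨hW1, hN1⟩ := Wsum_fold_digits g ks sw.1 sw.2 (pvDigitsA length i) nd hn
      obtain ⟨hW2, hN2⟩ := ih _ hN1
      refine ⟨?_, hN2⟩
      rw [hW2, hW1]
      simp only [Wsum, List.map_cons, List.sum_cons]
      ring

-- the weighted indicator sum is the dict lookup (unique keys)
theorem Wsum_indicator (start : List Int) :
    ∀ (l : List (List Int × Int)), (l.map Prod.fst).Nodup →
    Wsum (fun s => if s = start then 1 else 0) l = (PySem.Dict.mk l).getD start 0 := by
  intro l
  induction l with
  | nil => simp [Wsum, PySem.Dict.getD, PySem.Dict.get?]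
  | cons p t ih =>
      obtain ⟨pk, pw⟩ := p
      intro hn
      simp only [List.map_cons, List.nodup_cons, List.mem_map] at hn
      by_cases h : pk = start
      · have ht0 : (List.map (fun sw => sw.2 * if sw.1 = start then (1 : Int) else 0) t).sum = 0 := by
          have hns : ∀ l' : List (List Int × Int), start ∉ l'.map (fun q => q.1) →
              (List.map (fun sw => sw.2 * if sw.1 = start then (1 : Int) else 0) l').sum = 0 := by
            intro l'
            induction l' with
            | nil => intro _; rfl
            | cons q t' ih' =>
                intro hna
                simp only [List.map_cons, List.mem_cons] at hna
                rw [not_or] at hna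
                simp only [List.map_cons, List.sum_cons, if_neg (Ne.symm hna.1)]
                rw [ih' hna.2]
                ring
          apply hns
          intro hmem
          rcases List.mem_map.mp hmem with ⟨q, hq, hq1⟩
          exact hn.1 ⟨q, hq, by rw [hq1, h]⟩
        simp only [Wsum, List.map_cons, List.sum_cons] at ht0 ⊢
        have hbe : (pk == start) = true := by simpa using h
        simp only [PySem.Dict.getD, PySem.Dict.get?_mk_cons, hbe, if_true]
        simp only [if_pos h]
        have ht0' : (List.map (fun sw => if sw.1 = start then sw.2 else (0 : Int)) t).sum = 0 := by
          simpa using ht0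
        simp [ht0']
      · simp only [Wsum, List.map_cons, List.sum_cons, if_neg h]
        have := ih hn.2
        simp only [Wsum] at this
        rw [this]
        have hbe : ¬(pk == start) = true := by simpa using h
        simp only [PySem.Dict.getD, PySem.Dict.get?_mk_cons, hbe]
        simp

-- main invariant: the remaining loop of A computes the weighted sum of pvF
theorem loop_eq (ks : List Int) (length : Int) (start : List Int) :
    ∀ (n : Nat) (i : Int) (dp : PySem.Dict (List Int) Int),
      (length - i).toNat = n → dp.keys.Nodup →
      pvLoopA ks length start i dp = Wsum (pvF ks length start i) dp.items := by
  intro n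
  induction n with
  | zero =>
      intro i dp h0 hn
      have hge : ¬ i < length := by omega
      rw [pvLoopA, dif_neg hge]
      have hfix : pvF ks length start i = fun s => if s = start then 1 else 0 := by
        funext s
        rw [pvF, dif_pos (by omega : length ≤ i)]
      rw [hfix, Wsum_indicator start dp.items hn]
  | succ n ih =>
      intro i dp h0 hn
      have hlt : i < length := by omega
      rw [pvLoopA, dif_pos hlt]
      obtain ⟨hW, hN⟩ := Wsum_fold_items (pvF ks length start (i + 1)) ks length i
        dp.items PySem.Dict.empty PySem.Dict.nodup_keys_empty
      have hndp : Wsum (pvF ks length start (i + 1)) (pvNdpA ks length i dp).items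
          = Wsum (pvF ks length start i) dp.items := by
        rw [pvNdpA, hW]
        have hfix : (fun s => ((pvDigitsA length i).map (fun d =>
            match pvStepA s ks d with
            | some ns => pvF ks length start (i + 1) ns
            | none => 0)).sum) = pvF ks length start i := by
          funext s
          rw [pvF, dif_neg (by omega : ¬ length ≤ i)]
        rw [hfix]
        simp [Wsum, PySem.Dict.empty]
      by_cases he : (pvNdpA ks length i dp).items = []
      · rw [if_pos he]
        rw [← hndp, he]
        rfl
      · rw [if_neg he]
        rw [ih (i + 1) (pvNdpA ks length i dp) (by omega) (by rw [pvNdpA]; exact hN)]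
        exact hndp

-- ===== VERDICT (by name: the statement is the Claim_ definition above) =====
theorem count_for_subset_and_length_py_spec : Claim_equal_count_for_subset_and_length_py := by
  intro ks length _ _
  unfold Spec_count_for_subset_and_length_py
  by_cases hm : ks.length = 0
  · unfold count_for_subset_and_length_py count_for_subset_and_length_py_alt
    simp [hm]
  · rw [alt_eq_pvF ks length hm]
    unfold count_for_subset_and_length_py
    simp only [hm, if_false]
    set start : List Int := List.replicate ks.length 0 with hstart
    have hitems : (PySem.Dict.empty.insert start (1 : Int)).items = [(start, 1)] := by
      rw [PySem.Dict.items_insert_of_not_contains _ _ (PySem.Dict.contains_empty start)]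
      rfl
    rw [loop_eq ks length start (length - 0).toNat 0 (PySem.Dict.empty.insert start 1) rfl
        (PySem.Dict.nodup_keys_insert _ _ _ PySem.Dict.nodup_keys_empty)]
    rw [hitems]
    simp [Wsum]
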